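-- pv_equiv track=rewrite | github.com/CopurOnur/tattoo_search_engine | backend/search_engines/manager.py | _simplify_query
-- ===== SOURCE A (Python) =====
-- def _simplify_query(query: str) -> str:
--     """Simplify query by removing complex terms and keeping core concepts."""
--     # Remove adjectives and keep main nouns
--     words = query.split()
--
--     # Common tattoo-related keywords to keep
--     core_keywords = {
--         'tattoo', 'design', 'art', 'ink', 'traditional', 'realistic', 'geometric',
--         'tribal', 'watercolor', 'minimalist', 'blackwork', 'dotwork',
--         'dragon', 'flower', 'skull', 'rose', 'bird', 'lion', 'butterfly'
--     }
--
--     # Keep important words and first few words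
--     simplified_words = []
--     for i, word in enumerate(words):
--         if i < 3 or word.lower() in core_keywords:
--             simplified_words.append(word)
--
--     simplified = ' '.join(simplified_words)
--     return simplified if simplified else 'tattoo art'
-- ===== SOURCE B (Python) =====
-- def _simplify_query(query: str) -> str:
--     """Simplify query by removing complex terms and keeping core concepts."""
--     core_keywords = {
--         'tattoo', 'design', 'art', 'ink', 'traditional', 'realistic', 'geometric',
--         'tribal', 'watercolor', 'minimalist', 'blackwork', 'dotwork',
--         'dragon', 'flower', 'skull', 'rose', 'bird', 'lion', 'butterfly'
--     }
--
--     def rendered(ws, free):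
--         """Recursively render the kept words, each preceded by one space."""
--         if not ws:
--             return ''
--         tail = rendered(ws[1:], free - 1 if free > 0 else 0)
--         if free > 0 or ws[0].lower() in core_keywords:
--             return ' ' + ws[0] + tail
--         return tail
--
--     s = rendered(query.split(), 3)
--     return s[1:] if s else 'tattoo art'
-- ===== Notes on version B (the rewrite author's own statement) =====
-- stated objective: alternative
-- what changed: Replaces A's index-tested loop that collects kept words into a list and space-joins them with a recursive renderer that builds the result string directly back-to-front, prepending one space before each kept word under a decrementing budget and finally stripping the leading space with s[1:]; no intermediate list and no join.
import Mathlib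
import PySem

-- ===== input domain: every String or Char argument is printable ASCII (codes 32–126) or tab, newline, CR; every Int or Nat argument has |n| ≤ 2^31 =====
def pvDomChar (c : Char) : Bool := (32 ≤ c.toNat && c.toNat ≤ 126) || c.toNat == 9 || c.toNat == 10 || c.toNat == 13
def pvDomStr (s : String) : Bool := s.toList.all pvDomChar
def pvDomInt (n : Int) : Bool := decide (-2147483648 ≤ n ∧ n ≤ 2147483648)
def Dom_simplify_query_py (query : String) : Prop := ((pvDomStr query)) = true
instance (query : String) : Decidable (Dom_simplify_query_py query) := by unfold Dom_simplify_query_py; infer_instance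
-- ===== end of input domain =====

-- B builds the result string directly by recursion over the word list (one space prepended before
-- every kept word under a decrementing budget, leading space stripped at the end), instead of A's
-- indexed loop that collects a list of kept words and space-joins it (objective: alternative).

-- shared literal constant: the Python set of core keywords (distinct literals)
def pvCoreKeywords : PySem.Set String :=
  PySem.Set.ofList ["tattoo", "design", "art", "ink", "traditional", "realistic", "geometric",
    "tribal", "watercolor", "minimalist", "blackwork", "dotwork",
    "dragon", "flower", "skull", "rose", "bird", "lion", "butterfly"]

-- ===== PORT A =====
-- the 'for i, word in enumerate(words)' loop, accumulating simplified_words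
def pvALoop (i : Nat) (ws : List String) (acc : List String) : List String :=
  match ws with
  | [] => acc
  | w :: rest =>
      pvALoop (i + 1) rest
        (if i < 3 || PySem.Set.contains pvCoreKeywords (PySem.Str.lower w) then acc ++ [w] else acc)

def simplify_query_py (query : String) : String :=
  let words := PySem.Str.split₀ query
  let simplified := PySem.Str.join " " (pvALoop 0 words [])
  if simplified = "" then "tattoo art" else simplified

-- ===== PORT B =====
-- the recursive helper 'rendered(ws, free)': each kept word preceded by one space
def pvBRendered (ws : List String) (free : Nat) : String :=
  match ws with
  | [] => ""
  | w :: rest =>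
      let tail := pvBRendered rest (if free > 0 then free - 1 else 0)
      if free > 0 || PySem.Set.contains pvCoreKeywords (PySem.Str.lower w) then
        " " ++ w ++ tail
      else tail

def simplify_query_py_alt (query : String) : String :=
  let s := pvBRendered (PySem.Str.split₀ query) 3
  if s = "" then "tattoo art" else PySem.Str.slice s (some 1) none

-- ===== PRECONDITION & SPEC =====
def Spec_simplify_query_py (query : String) (out : String) : Prop := out = simplify_query_py_alt query
instance (query : String) (out : String) : Decidable (Spec_simplify_query_py query out) := by unfold Spec_simplify_query_py; infer_instance

-- ===== CLAIM (what is proved, stated in full; the proofs are below) =====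
def Claim_equal_simplify_query_py : Prop := ∀ (query : String), Dom_simplify_query_py query → Spec_simplify_query_py query (simplify_query_py query)

-- ===== LEMMAS AND PROOFS =====

-- abbreviation for the keep test on a word past the head
def pvKeep (w : String) : Bool := PySem.Set.contains pvCoreKeywords (PySem.Str.lower w)

-- A's indexed loop is the head-take / tail-filter split, uniformly in the starting index
theorem pvALoop_eq (ws : List String) : ∀ (i : Nat) (acc : List String),
    pvALoop i ws acc = acc ++ ws.take (3 - i) ++ ((ws.drop (3 - i)).filter pvKeep) := by
  induction ws with
  | nil => intro i acc; simp [pvALoop]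
  | cons w rest ih =>
    intro i acc
    by_cases hi : i < 3
    · have h3 : 3 - i = (3 - (i + 1)) + 1 := by omega
      simp [pvALoop, hi, ih, h3]
    · have h0 : 3 - i = 0 := by omega
      have h1 : 3 - (i + 1) = 0 := by omega
      simp only [pvALoop, ih, h0, h1, List.take_zero, List.drop_zero, List.filter_cons]
      by_cases hw : pvKeep w = true <;> simp [pvKeep, hi] at hw ⊢ <;> simp [hw]

-- B's renderer flattens the same kept list, one space before each word
theorem pvBRendered_toList (ws : List String) : ∀ (free : Nat),
    (pvBRendered ws free).toList =
      (ws.take free ++ (ws.drop free).filter pvKeep).flatMap (fun w => ' ' :: w.toList) := by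
  induction ws with
  | nil => intro free; simp [pvBRendered]
  | cons w rest ih =>
    intro free
    by_cases hf : free > 0
    · obtain ⟨k, rfl⟩ : ∃ k, free = k + 1 := ⟨free - 1, by omega⟩
      simp [pvBRendered, ih, String.toList_append]
    · have h0 : free = 0 := by omega
      subst h0
      simp only [pvBRendered, gt_iff_lt, lt_self_iff_false, if_false, decide_false,
        Bool.false_or, List.take_zero, List.drop_zero, List.nil_append, List.filter_cons]
      by_cases hw : PySem.Str.lower w ∈ pvCoreKeywords
      · simp [pvKeep, hw, ih, String.toList_append]
      · simp [pvKeep, hw, ih]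

-- the space-join of a list is its space-prefixed flattening with the leading space dropped
theorem pvJoin_toList (l : List String) :
    (PySem.Str.join " " l).toList = (l.flatMap (fun w => ' ' :: w.toList)).drop 1 := by
  induction l with
  | nil => simp [PySem.Str.toList_join, PySem.Chars.join_nil]
  | cons w rest ih =>
    cases rest with
    | nil => simp [PySem.Str.toList_join, PySem.Chars.join_singleton]
    | cons y ys =>
      have := PySem.Chars.join_cons_cons (" ".toList) w.toList (y.toList) (ys.map String.toList)
      simp only [PySem.Str.toList_join, List.map_cons, this]
      simp only [PySem.Str.toList_join, List.map_cons] at ih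
      have hsep : (" " : String).toList = [' '] := rfl
      rw [hsep] at ih ⊢
      simp [ih]

-- every word produced by Python's str.split() is nonempty (proved on split₀'s accumulator loop)
theorem pvSplit₀go_ne (s : List Char) : ∀ (cur : List Char) (acc : List (List Char)),
    (∀ a ∈ acc, a ≠ []) → ∀ w ∈ PySem.Chars.split₀.go s cur acc, w ≠ [] := by
  induction s with
  | nil =>
    intro cur acc hacc w hw
    by_cases hc : cur.isEmpty = true
    · simp [PySem.Chars.split₀.go, hc] at hw
      exact hacc w hw
    · simp [PySem.Chars.split₀.go, hc] at hw
      rcases hw with hw | hw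
      · exact hacc w hw
      · subst hw; simpa [List.isEmpty_iff] using hc
  | cons c rest ih =>
    intro cur acc hacc w hw
    by_cases hs : PySem.Chars.isspace c = true
    · by_cases hc : cur.isEmpty = true
      · simp only [PySem.Chars.split₀.go, hs, hc, if_true] at hw
        exact ih [] acc hacc w hw
      · simp only [PySem.Chars.split₀.go, hs, hc, if_true] at hw
        refine ih [] (cur.reverse :: acc) ?_ w hw
        intro a ha
        rcases List.mem_cons.mp ha with rfl | ha
        · simpa [List.isEmpty_iff] using hc
        · exact hacc a ha
    · simp only [PySem.Chars.split₀.go, hs] at hw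
      exact ih (c :: cur) acc hacc w hw

theorem pvSplit₀_ne (q : String) : ∀ w ∈ PySem.Str.split₀ q, w ≠ "" := by
  intro w hw
  have hmap : w.toList ∈ List.map String.toList (PySem.Str.split₀ q) := List.mem_map_of_mem hw
  rw [PySem.Str.split₀_map_toList] at hmap
  have := pvSplit₀go_ne q.toList [] [] (by simp) w.toList hmap
  intro h; subst h; simp at this

-- ===== VERDICT (by name: the statement is the Claim_ definition above) =====
theorem simplify_query_py_spec : Claim_equal_simplify_query_py := by
  intro query _
  unfold Spec_simplify_query_py simplify_query_py simplify_query_py_alt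
  set ws := PySem.Str.split₀ query with hws
  set kept := ws.take 3 ++ (ws.drop 3).filter pvKeep with hkept
  have hA : pvALoop 0 ws [] = kept := by simpa using pvALoop_eq ws 0 []
  have hB : (pvBRendered ws 3).toList = kept.flatMap (fun w => ' ' :: w.toList) :=
    pvBRendered_toList ws 3
  have hJ : (PySem.Str.join " " (pvALoop 0 ws [])).toList
      = (kept.flatMap (fun w => ' ' :: w.toList)).drop 1 := by
    rw [hA]; exact pvJoin_toList kept
  cases hk : kept with
  | nil =>
    have hj0 : PySem.Str.join " " (pvALoop 0 ws []) = "" := by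
      have : (PySem.Str.join " " (pvALoop 0 ws [])).toList = [] := by simp [hJ, hk]
      exact String.toList_inj.mp this
    have hb0 : pvBRendered ws 3 = "" := by
      have : (pvBRendered ws 3).toList = [] := by simp [hB, hk]
      exact String.toList_inj.mp this
    simp [hj0, hb0]
  | cons w rest =>
    have hwne : w ≠ "" := by
      apply pvSplit₀_ne query
      have hmem : w ∈ kept := by rw [hk]; exact List.mem_cons_self
      rw [hkept] at hmem
      rcases List.mem_append.mp hmem with h | h
      · exact List.mem_of_mem_take h
      · exact List.mem_of_mem_drop (List.mem_of_mem_filter h)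
    have hflat : kept.flatMap (fun w => ' ' :: w.toList)
        = ' ' :: (w.toList ++ rest.flatMap (fun w => ' ' :: w.toList)) := by
      rw [hk]; simp
    have hjne : PySem.Str.join " " (pvALoop 0 ws []) ≠ "" := by
      intro h
      have : (PySem.Str.join " " (pvALoop 0 ws [])).toList = [] := by simp [h]
      rw [hJ, hflat] at this
      simp at this
      exact hwne this.1
    have hbne : pvBRendered ws 3 ≠ "" := by
      intro h
      have : (pvBRendered ws 3).toList = [] := by simp [h]
      rw [hB, hflat] at this
      simp at this
    rw [if_neg hjne, if_neg hbne]
    apply String.ext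
    show (PySem.Str.join " " (pvALoop 0 ws [])).toList = (PySem.Str.slice (pvBRendered ws 3) (some 1) none).toList
    rw [hJ]
    have hsl : (PySem.Str.slice (pvBRendered ws 3) (some 1) none).toList
        = (pvBRendered ws 3).toList.drop 1 := by
      simp [PySem.Str.toList_slice, PySem.Chars.slice_eq_listSlice, PySem.List.slice_from_one,
        List.drop_one]
    rw [hsl, hB, List.drop_one]
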